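-- pv_equiv track=rewrite | github.com/yeonjaedev/algorithm | algorithm/pr_lv1_86491.py | solution
-- ===== SOURCE A (Python) =====
-- def solution(sizes):
--     answer = 0
--     maxX = 0
--     maxY = 0
--     for i in sizes:
--         if i[0] < i[1]:
--             maxX = max(i[1],maxX)
--             maxY = max(i[0],maxY)
--         else :
--             maxX = max(i[0],maxX)
--             maxY = max(i[1],maxY)
--     answer = maxX * maxY
--     return answer
-- ===== SOURCE B (Python) =====
-- def solution(sizes):
--     sides = sorted([0] + [x for s in sizes for x in (s[0], s[1])])
--     mins = sorted([0] + [min(s[0], s[1]) for s in sizes])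
--     return sides[-1] * mins[-1]
-- ===== Notes on version B (the rewrite author's own statement) =====
-- stated objective: alternative
-- what changed: Replaces A's single loop threading a branching (maxX, maxY) accumulator with a sort-based computation: flatten all card sides into one 0-seeded list, sort it and take its last element (the largest side overall), sort the 0-seeded list of per-card smaller sides and take its last element, then multiply; trades A's O(n) scan for O(n log n) sorting in exchange for no running state at all.
import Mathlib
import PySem

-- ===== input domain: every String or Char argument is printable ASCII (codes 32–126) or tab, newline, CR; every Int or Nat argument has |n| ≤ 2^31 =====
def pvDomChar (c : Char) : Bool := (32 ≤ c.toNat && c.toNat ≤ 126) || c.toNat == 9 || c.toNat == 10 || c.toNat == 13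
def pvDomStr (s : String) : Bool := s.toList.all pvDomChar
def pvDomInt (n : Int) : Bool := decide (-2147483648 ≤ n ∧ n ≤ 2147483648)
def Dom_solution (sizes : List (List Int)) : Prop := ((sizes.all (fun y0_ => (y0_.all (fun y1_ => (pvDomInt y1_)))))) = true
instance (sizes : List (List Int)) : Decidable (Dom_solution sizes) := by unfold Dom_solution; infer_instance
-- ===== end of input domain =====

-- B replaces A's single branching running-max loop with a sort-based approach
-- (sort the 0-seeded flattened side list and the 0-seeded per-card-minimum list,
-- take the last element of each, multiply); objective: alternative.

-- ===== PORT A =====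
-- A's loop over sizes, threading the pair (maxX, maxY); i[0]/i[1] via pyGetD
-- (Pre_solution guarantees the indices are in range, where Python would raise).
def solution (sizes : List (List Int)) : Int :=
  let st := sizes.foldl (fun (p : Int × Int) i =>
    let a := PySem.List.pyGetD i 0 0
    let b := PySem.List.pyGetD i 1 0
    if a < b then (max b p.1, max a p.2) else (max a p.1, max b p.2)) (0, 0)
  st.1 * st.2

-- ===== PORT B =====
-- sorted([0] + flattened sides)[-1] * sorted([0] + per-card mins)[-1];
-- both sorted lists contain 0, so the [-1] indexing never raises (pyGetD default unused).
def solution_alt (sizes : List (List Int)) : Int :=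
  let sides := PySem.List.sorted
    (0 :: sizes.flatMap (fun s => [PySem.List.pyGetD s 0 0, PySem.List.pyGetD s 1 0]))
    (fun x => x) false
  let mins := PySem.List.sorted
    (0 :: sizes.map (fun s => min (PySem.List.pyGetD s 0 0) (PySem.List.pyGetD s 1 0)))
    (fun x => x) false
  PySem.List.pyGetD sides (-1) 0 * PySem.List.pyGetD mins (-1) 0

-- ===== PRECONDITION & SPEC =====
-- Pre_ excludes exactly the inputs where Python A raises IndexError (a card with
-- fewer than two entries); B raises there too.
def Pre_solution (sizes : List (List Int)) : Prop :=
  ∀ s ∈ sizes, 2 ≤ s.length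
instance (sizes : List (List Int)) : Decidable (Pre_solution sizes) := by unfold Pre_solution; infer_instance

def pvWitness_solution : List (List Int) := [[60, 50], [30, 70], [60, 30], [80, 40]]

def Spec_solution (sizes : List (List Int)) (out : Int) : Prop := out = solution_alt sizes
instance (sizes : List (List Int)) (out : Int) : Decidable (Spec_solution sizes out) := by unfold Spec_solution; infer_instance

-- ===== CLAIM (what is proved, stated in full; the proofs are below) =====
def Claim_equal_solution : Prop := ∀ (sizes : List (List Int)), Dom_solution sizes → Pre_solution sizes → Spec_solution sizes (solution sizes)

-- ===== LEMMAS AND PROOFS =====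

-- xs[-1] on a nonempty list is its last element.
theorem pyGetD_neg_one_getLast (l : List Int) (h : l ≠ []) (d : Int) :
    PySem.List.pyGetD l (-1) d = l.getLast h := by
  have hlen : 1 ≤ l.length := List.length_pos_iff.mpr h
  simp [PySem.List.pyGetD, PySem.List.pyGet?, PySem.List.pyIdx?, hlen,
    List.getElem?_eq_getElem (by omega : l.length - 1 < l.length),
    List.getLast_eq_getElem]

-- The last element of sorted(x0 :: l) is the running maximum of l started at x0.
theorem lastSortedMax (x0 : Int) (l : List Int) (d : Int) :
    PySem.List.pyGetD (PySem.List.sorted (x0 :: l) (fun x => x) false) (-1) d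
      = l.foldl max x0 := by
  set sl := PySem.List.sorted (x0 :: l) (fun x => x) false with hsl
  have hne : sl ≠ [] := by simp [hsl, PySem.List.sorted_eq_nil_iff]
  rw [pyGetD_neg_one_getLast sl hne d]
  have hperm : sl.Perm (x0 :: l) := PySem.List.sorted_perm _ _ _
  have hmemL : sl.getLast hne ∈ (x0 :: l) := hperm.mem_iff.mp (List.getLast_mem hne)
  have hpair : sl.Pairwise (fun a b => a ≤ b) := by
    have := PySem.List.sorted_pairwise (x0 :: l) (fun x : Int => x)
    simpa [hsl] using this
  have hub : ∀ y ∈ (x0 :: l), y ≤ sl.getLast hne := by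
    intro y hy
    have hy' : y ∈ sl := hperm.mem_iff.mpr hy
    rcases List.getElem_of_mem hy' with ⟨i, hi, rfl⟩
    rw [List.getLast_eq_getElem hne]
    rcases eq_or_lt_of_le (Nat.le_pred_of_lt hi) with h | h
    · simp [h]
    · exact List.pairwise_iff_getElem.mp hpair i (sl.length - 1) hi (by omega) (by omega)
  have hF := PySem.List.le_foldl_max l x0
  have hFmem : l.foldl max x0 ∈ (x0 :: l) := by
    rcases PySem.List.foldl_max_mem l x0 with h | h
    · simp [h]
    · simp [h]
  refine le_antisymm ?_ (hub _ hFmem)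
  rcases List.mem_cons.mp hmemL with h | h
  · exact h ▸ hF.1
  · exact hF.2 _ h

-- Running max over the flattened side pairs = running max over per-card larger sides.
theorem flatFoldMax (sizes : List (List Int)) : ∀ (x : Int),
    (sizes.flatMap (fun s => [PySem.List.pyGetD s 0 0, PySem.List.pyGetD s 1 0])).foldl max x
      = (sizes.map (fun s => max (PySem.List.pyGetD s 0 0) (PySem.List.pyGetD s 1 0))).foldl max x := by
  induction sizes with
  | nil => intro x; rfl
  | cons s rest ih =>
    intro x
    simp only [List.flatMap_cons, List.map_cons, List.foldl_cons, List.foldl_append]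
    rw [ih]
    congr 1
    exact max_assoc x _ _

-- A's paired fold equals the pair of two independent max-folds over projections.
theorem pairFold_eq (sizes : List (List Int)) : ∀ (x y : Int),
    sizes.foldl (fun (p : Int × Int) i =>
      let a := PySem.List.pyGetD i 0 0
      let b := PySem.List.pyGetD i 1 0
      if a < b then (max b p.1, max a p.2) else (max a p.1, max b p.2)) (x, y)
    = ((sizes.map (fun s => max (PySem.List.pyGetD s 0 0) (PySem.List.pyGetD s 1 0))).foldl max x,
       (sizes.map (fun s => min (PySem.List.pyGetD s 0 0) (PySem.List.pyGetD s 1 0))).foldl max y) := by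
  induction sizes with
  | nil => intro x y; rfl
  | cons s rest ih =>
    intro x y
    simp only [List.foldl_cons, List.map_cons]
    by_cases h : PySem.List.pyGetD s 0 0 < PySem.List.pyGetD s 1 0
    · simp only [if_pos h]
      rw [ih]
      congr 1 <;> congr 1 <;> omega
    · simp only [if_neg h]
      rw [ih]
      congr 1 <;> congr 1 <;> omega

-- ===== VERDICT (by name: the statement is the Claim_ definition above) =====
theorem solution_spec : Claim_equal_solution := by
  intro sizes _ _
  unfold Spec_solution solution solution_alt
  rw [pairFold_eq]
  dsimp only
  rw [lastSortedMax, lastSortedMax, flatFoldMax]
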